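-- pv_equiv track=rewrite | github.com/vlcao/MVN_Forex | PythonOptimizationProjects/HappyForex_EA/scr/DataHandler/hardcoded_data.py | get_subset_data
-- ===== SOURCE A (Python) =====
-- DEFAULT_NUMBER_INT = 0
--
-- def get_subset_data(origin_data, subtract_list_string):
--
--     # initialize the OPTIMIZED_PARAMETERS_DATA
--     list_count = DEFAULT_NUMBER_INT
--     data_col = len(origin_data[DEFAULT_NUMBER_INT])
--     data_row = len(subtract_list_string)
--     subset_data = [["" for x in range(data_col)] for y in range(data_row)]
--
--     # append all needed item in the list together
--     while (list_count < len(subtract_list_string)):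
--         for i in range(len(origin_data)):
--             if subtract_list_string[list_count] == origin_data[i][DEFAULT_NUMBER_INT]:
--                 for j in range(len(origin_data[i])):
--                     subset_data[list_count][j] = origin_data[i][j]
--         list_count += 1
--
--     return subset_data
-- ===== SOURCE B (Python) =====
-- def get_subset_data(origin_data, subtract_list_string):
--     data_col = len(origin_data[0])
--     # index: key value -> list of positions in subtract_list_string (one pass)
--     positions = {}
--     for idx, key in enumerate(subtract_list_string):
--         positions.setdefault(key, []).append(idx)
--     subset_data = [["" for _ in range(data_col)] for _ in range(len(subtract_list_string))]
--     # single pass over origin rows, in order (preserves last-match-wins and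
--     # the no-reset accumulation between successive matching rows); an empty
--     # row has no first column, so it cannot match any key and is skipped
--     for row in origin_data:
--         if row:
--             for p in positions.get(row[0], ()):
--                 for j, value in enumerate(row):
--                     subset_data[p][j] = value
--     return subset_data
-- ===== Notes on version B (the rewrite author's own statement) =====
-- stated objective: alternative
-- what changed: Inverted the loop nesting: instead of scanning all origin rows once per key (keys outer, rows inner), B builds a dict from key value to its positions in subtract_list_string in one pass and then makes a single in-order pass over origin_data, copying each row into every matching position, which preserves last-match-wins and the never-reset accumulation.
import Mathlib
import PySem

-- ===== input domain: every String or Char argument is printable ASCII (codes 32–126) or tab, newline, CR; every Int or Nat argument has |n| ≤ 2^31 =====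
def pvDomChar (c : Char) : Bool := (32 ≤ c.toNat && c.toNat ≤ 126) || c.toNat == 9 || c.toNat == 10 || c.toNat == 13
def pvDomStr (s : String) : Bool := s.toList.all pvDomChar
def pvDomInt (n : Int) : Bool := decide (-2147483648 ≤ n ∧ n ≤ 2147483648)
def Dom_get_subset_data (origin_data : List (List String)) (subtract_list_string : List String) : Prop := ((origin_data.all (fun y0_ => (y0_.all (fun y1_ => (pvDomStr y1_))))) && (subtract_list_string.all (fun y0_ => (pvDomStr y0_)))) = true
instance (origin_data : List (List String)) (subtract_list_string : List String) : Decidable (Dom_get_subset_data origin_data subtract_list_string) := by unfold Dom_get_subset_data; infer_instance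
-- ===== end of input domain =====

-- B replaces A's rescan of all origin rows for every key by a key→positions index built
-- in one pass plus a single in-order pass over origin_data; proved equal on Pre_, which
-- excludes exactly the inputs where a Python run of A raises IndexError (see the Pre_ comment).


-- ===== PORT A =====
-- grid cell assignment subset_data[r][j] = v (exact for in-range indices; the
-- out-of-range accesses, where Python raises IndexError, are excluded by Pre_)
def pvSetCell (g : List (List String)) (r j : Nat) (v : String) : List (List String) :=
  g.set r ((g.getD r []).set j v)

def get_subset_data (origin_data : List (List String)) (subtract_list_string : List String) : List (List String) :=
  let data_col := (origin_data.headD []).length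
  let subset := subtract_list_string.map (fun _ => List.replicate data_col "")
  -- while list_count < len(subtract_list_string): for i in range(len(origin_data)): …
  (List.range subtract_list_string.length).foldl
    (fun acc lc =>
      origin_data.foldl
        (fun acc2 row =>
          if subtract_list_string.getD lc "" == row.headD "" then
            (List.range row.length).foldl (fun a j => pvSetCell a lc j (row.getD j "")) acc2
          else acc2)
        acc)
    subset

-- ===== PORT B =====
-- positions.setdefault(key, []).append(idx) over enumerate(subtract_list_string)
def pvBuildPos (subtract_list_string : List String) : PySem.Dict String (List Int) :=
  (PySem.List.enumerate subtract_list_string 0).foldl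
    (fun d p => d.modify p.2 [] (fun l => l ++ [p.1])) PySem.Dict.empty

def get_subset_data_alt (origin_data : List (List String)) (subtract_list_string : List String) : List (List String) :=
  let data_col := (origin_data.headD []).length
  let positions := pvBuildPos subtract_list_string
  let subset := subtract_list_string.map (fun _ => List.replicate data_col "")
  origin_data.foldl
    (fun g row =>
      -- if row: … (an empty row has no first column, so it is skipped)
      if row.isEmpty then g
      else
        (positions.getD (row.headD "") []).foldl
          (fun a p =>
            -- for j, value in enumerate(row): subset_data[p][j] = value
            (PySem.List.enumerate row 0).foldl
              (fun a2 jv => pvSetCell a2 p.toNat jv.1.toNat jv.2) a)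
          g)
    subset

-- ===== PRECONDITION & SPEC =====
-- Pre_ excludes exactly the inputs where A raises IndexError: empty origin_data
-- (origin_data[0]), an empty origin row while subtract_list_string is nonempty
-- (origin_data[i][0] inside the loop), or a matched row longer than the first row
-- (assignment past the end of the preallocated subset row).
def Pre_get_subset_data (origin_data : List (List String)) (subtract_list_string : List String) : Prop :=
  origin_data ≠ [] ∧
    (subtract_list_string ≠ [] → ∀ row ∈ origin_data, row ≠ []) ∧
    (∀ row ∈ origin_data, row.headD "" ∈ subtract_list_string →
      row.length ≤ (origin_data.headD []).length)
instance (origin_data : List (List String)) (subtract_list_string : List String) : Decidable (Pre_get_subset_data origin_data subtract_list_string) := by unfold Pre_get_subset_data; infer_instance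
def pvWitness_get_subset_data : List (List String) × List String :=
  ([["a", "1"], ["b", "2"]], ["b", "a", "b"])

def Spec_get_subset_data (origin_data : List (List String)) (subtract_list_string : List String) (out : List (List String)) : Prop := out = get_subset_data_alt origin_data subtract_list_string
instance (origin_data : List (List String)) (subtract_list_string : List String) (out : List (List String)) : Decidable (Spec_get_subset_data origin_data subtract_list_string out) := by unfold Spec_get_subset_data; infer_instance

-- ===== CLAIM (what is proved, stated in full; the proofs are below) =====
def Claim_equal_get_subset_data : Prop := ∀ (origin_data : List (List String)) (subtract_list_string : List String), Dom_get_subset_data origin_data subtract_list_string → Pre_get_subset_data origin_data subtract_list_string → Spec_get_subset_data origin_data subtract_list_string (get_subset_data origin_data subtract_list_string)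

-- ===== LEMMAS AND PROOFS =====

-- the final content of result row p: a blank row overwritten, in origin order, by every
-- origin row whose first column equals the key (never reset in between)
def pvRowWrite (s row : List String) : List String :=
  (List.range row.length).foldl (fun t j => t.set j (row.getD j "")) s

def pvRowFinal (od : List (List String)) (key : String) (s : List String) : List String :=
  od.foldl (fun t row => if key == row.headD "" then pvRowWrite t row else t) s

theorem length_pvSetCell (g : List (List String)) (r j : Nat) (v : String) :
    (pvSetCell g r j v).length = g.length := by simp [pvSetCell]

theorem getD_pvSetCell_ne (g : List (List String)) {p r : Nat} (j : Nat) (v : String)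
    (h : p ≠ r) : (pvSetCell g r j v).getD p [] = g.getD p [] := by
  simp [pvSetCell, List.getD, List.getElem?_set_ne (Ne.symm h)]

theorem getD_pvSetCell_eq (g : List (List String)) (r j : Nat) (v : String) :
    (pvSetCell g r j v).getD r [] = (g.getD r []).set j v := by
  unfold pvSetCell
  rw [List.getD_eq_getElem?_getD, List.getElem?_set]
  rw [if_pos rfl]
  by_cases h : r < g.length
  · rw [if_pos h]; rfl
  · rw [if_neg h]
    have h1 : g.getD r [] = [] := by
      rw [List.getD_eq_getElem?_getD, List.getElem?_eq_none (by omega)]; rfl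
    rw [h1]; rfl

-- a loop of assignments never changes the number of rows
theorem foldl_length_inv {ι : Type} (f : List (List String) → ι → List (List String))
    (h : ∀ a x, (f a x).length = a.length) :
    ∀ (L : List ι) (g : List (List String)), (L.foldl f g).length = g.length := by
  intro L
  induction L with
  | nil => intro g; rfl
  | cons x L ih => intro g; rw [List.foldl_cons, ih, h]

-- generic cell-copy loop into a fixed target row r
theorem foldl_setCell_getD_ne {ι : Type} (c : ι → Nat) (v : ι → String) {p r : Nat}
    (h : p ≠ r) : ∀ (L : List ι) (g : List (List String)),
      (L.foldl (fun a x => pvSetCell a r (c x) (v x)) g).getD p [] = g.getD p [] := by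
  intro L
  induction L with
  | nil => intro g; rfl
  | cons x L ih =>
      intro g
      rw [List.foldl_cons, ih, getD_pvSetCell_ne _ _ _ h]

theorem foldl_setCell_getD_eq {ι : Type} (c : ι → Nat) (v : ι → String) (r : Nat) :
    ∀ (L : List ι) (g : List (List String)),
      (L.foldl (fun a x => pvSetCell a r (c x) (v x)) g).getD r []
        = L.foldl (fun s x => s.set (c x) (v x)) (g.getD r []) := by
  intro L
  induction L with
  | nil => intro g; rfl
  | cons x L ih =>
      intro g
      rw [List.foldl_cons, ih, getD_pvSetCell_eq, List.foldl_cons]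

-- the enumerate-driven write of one row equals the index-driven one
theorem enum_set_eq (row : List String) :
    ∀ (n : Nat) (s : List String),
      (PySem.List.enumerate row (n : Int)).foldl (fun t jv => t.set jv.1.toNat jv.2) s
        = (List.range row.length).foldl (fun t j => t.set (n + j) (row.getD j "")) s := by
  induction row with
  | nil => intro n s; simp [PySem.List.enumerate_nil]
  | cons x row ih =>
      intro n s
      rw [PySem.List.enumerate_cons]
      have hcast : ((n : Int) + 1) = ((n + 1 : Nat) : Int) := by push_cast; ring
      rw [List.foldl_cons, hcast, ih (n + 1)]
      have hr : List.range (x :: row).length = 0 :: (List.range row.length).map Nat.succ := by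
        simp [List.range_succ_eq_map]
      rw [hr, List.foldl_cons, List.foldl_map]
      simp only [Int.toNat_natCast, List.getD_cons_zero, Nat.add_zero]
      congr 1
      funext t j
      simp [Nat.succ_eq_add_one]
      ring_nf

-- B's inner copy of one origin row into target row q
theorem copyRow_getD_eq (row : List String) (q : Nat) (g : List (List String)) :
    ((PySem.List.enumerate row 0).foldl
        (fun a2 jv => pvSetCell a2 q jv.1.toNat jv.2) g).getD q []
      = pvRowWrite (g.getD q []) row := by
  refine (foldl_setCell_getD_eq (fun (jv : Int × String) => jv.1.toNat) (fun jv => jv.2) q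
      (PySem.List.enumerate row 0) g).trans ?_
  show (PySem.List.enumerate row ((0 : Nat) : Int)).foldl
      (fun t jv => t.set jv.1.toNat jv.2) (g.getD q []) = _
  rw [enum_set_eq row 0]
  simp [pvRowWrite]

-- the key→positions index holds, for each key, exactly the filter of
-- range(len(subtract_list_string)) by key equality (as Nat indices, in order)
theorem enum_filter_map (key : String) (sl : List String) :
    ∀ (n : Nat),
      (((PySem.List.enumerate sl (n : Int)).filter (fun p => p.2 == key)).map
          (fun p => p.1.toNat))
        = ((List.range sl.length).filter (fun k => sl.getD k "" == key)).map (· + n) := by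
  induction sl with
  | nil => intro n; simp [PySem.List.enumerate_nil]
  | cons s sl ih =>
      intro n
      have hcast : ((n : Int) + 1) = ((n + 1 : Nat) : Int) := by push_cast; ring
      rw [PySem.List.enumerate_cons, List.filter_cons, hcast]
      have h1 : ((fun k => (s :: sl).getD k "" == key) ∘ Nat.succ)
          = (fun k => sl.getD k "" == key) := by
        funext k; simp
      have h2 : ((fun x => x + n) ∘ Nat.succ) = (fun x => x + (n + 1)) := by
        funext k; simp [Function.comp, Nat.succ_eq_add_one]; omega
      have htail : ((List.range (s :: sl).length).filter
            (fun k => (s :: sl).getD k "" == key)).map (· + n)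
          = (if (s == key) = true then [n] else [])
            ++ ((List.range sl.length).filter (fun k => sl.getD k "" == key)).map (· + (n + 1)) := by
        rw [show List.range (s :: sl).length = 0 :: (List.range sl.length).map Nat.succ by
              simp [List.range_succ_eq_map],
            List.filter_cons]
        by_cases h : (s == key) = true
        · rw [if_pos (by simpa using h), if_pos h, List.map_cons, List.filter_map, List.map_map,
            h1, h2]
          simp
        · rw [if_neg (by simpa using h), if_neg h, List.filter_map, List.map_map, h1, h2]
          simp
      rw [htail]
      by_cases h : (s == key) = true
      · rw [if_pos h, List.map_cons, ih (n + 1)]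
        have : s = key := by simpa using h
        simp [this]
      · rw [if_neg h, ih (n + 1)]
        have : ¬ s = key := by simpa using h
        simp [this]

theorem buildPos_getD (sl : List String) (key : String) :
    (pvBuildPos sl).getD key []
      = ((PySem.List.enumerate sl 0).filter (fun p => p.2 == key)).map (fun p => p.1) := by
  have hfold : pvBuildPos sl
      = ((PySem.List.enumerate sl 0).map Prod.swap).foldl
          (fun d p => d.modify p.1 [] (fun l => l ++ [p.2])) PySem.Dict.empty := by
    rw [List.foldl_map]; rfl
  rw [hfold, PySem.Dict.getD_foldl_modify_append, PySem.Dict.getD_empty, List.nil_append,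
    List.filter_map, List.map_map]
  congr 1

theorem buildPos_getD_toNat (sl : List String) (key : String) :
    ((pvBuildPos sl).getD key []).map Int.toNat
      = (List.range sl.length).filter (fun k => sl.getD k "" == key) := by
  rw [buildPos_getD, List.map_map]
  have := enum_filter_map key sl 0
  rw [show ((0 : Nat) : Int) = (0 : Int) by rfl] at this
  rw [show ((fun i => Int.toNat i) ∘ fun (p : Int × String) => p.1)
        = (fun (p : Int × String) => p.1.toNat) by rfl, this]
  simp

-- folding the row copy over a duplicate-free list of target rows
theorem foldl_copy_nodup (row : List String) (p : Nat) :
    ∀ (L : List Nat), L.Nodup → ∀ (g : List (List String)),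
      (L.foldl (fun a q =>
          (PySem.List.enumerate row 0).foldl
            (fun a2 jv => pvSetCell a2 q jv.1.toNat jv.2) a) g).getD p []
        = if p ∈ L then pvRowWrite (g.getD p []) row else g.getD p [] := by
  intro L
  induction L with
  | nil => intro _ g; simp
  | cons q L ih =>
      intro hnd g
      rw [List.foldl_cons, ih hnd.of_cons]
      by_cases hpq : p = q
      · subst hpq
        have hnotin : p ∉ L := (List.nodup_cons.mp hnd).1
        rw [if_neg hnotin, if_pos (List.mem_cons_self), copyRow_getD_eq]
      · have hne : ((PySem.List.enumerate row 0).foldl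
              (fun a2 jv => pvSetCell a2 q jv.1.toNat jv.2) g).getD p [] = g.getD p [] :=
          foldl_setCell_getD_ne (fun (jv : Int × String) => jv.1.toNat) (fun jv => jv.2) hpq _ g
        rw [hne]
        by_cases hmem : p ∈ L
        · rw [if_pos hmem, if_pos (List.mem_cons_of_mem _ hmem)]
        · rw [if_neg hmem, if_neg (by simp [hpq, hmem])]

-- A's inner pass over origin rows touches only target row lc …
theorem innerA_getD_ne (od : List (List String)) (sl : List String) {p lc : Nat}
    (h : p ≠ lc) : ∀ (acc : List (List String)),
      (od.foldl (fun a row =>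
          if sl.getD lc "" == row.headD "" then
            (List.range row.length).foldl (fun a2 j => pvSetCell a2 lc j (row.getD j "")) a
          else a) acc).getD p [] = acc.getD p [] := by
  induction od with
  | nil => intro acc; rfl
  | cons row od ih =>
      intro acc
      rw [List.foldl_cons, ih]
      by_cases hc : (sl.getD lc "" == row.headD "") = true
      · rw [if_pos hc, foldl_setCell_getD_ne (fun j => j) (fun j => row.getD j "") h]
      · rw [if_neg hc]

-- … and leaves there exactly the accumulated overwrite by all matching rows
theorem innerA_getD_eq (od : List (List String)) (sl : List String) (lc : Nat) :
    ∀ (acc : List (List String)),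
      (od.foldl (fun a row =>
          if sl.getD lc "" == row.headD "" then
            (List.range row.length).foldl (fun a2 j => pvSetCell a2 lc j (row.getD j "")) a
          else a) acc).getD lc [] = pvRowFinal od (sl.getD lc "") (acc.getD lc []) := by
  induction od with
  | nil => intro acc; rfl
  | cons row od ih =>
      intro acc
      rw [List.foldl_cons, ih]
      simp only [pvRowFinal]
      rw [List.foldl_cons]
      congr 1
      by_cases hc : (sl.getD lc "" == row.headD "") = true
      · rw [if_pos hc, if_pos hc]
        exact foldl_setCell_getD_eq (fun (j : Nat) => j) (fun j => row.getD j "") lc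
          (List.range row.length) acc
      · rw [if_neg hc, if_neg hc]

-- A's outer while loop over a duplicate-free list of key positions
theorem foldl_innerA_nodup (od : List (List String)) (sl : List String) (p : Nat) :
    ∀ (ks : List Nat), ks.Nodup → ∀ (acc : List (List String)),
      (ks.foldl (fun acc lc =>
          od.foldl (fun a row =>
            if sl.getD lc "" == row.headD "" then
              (List.range row.length).foldl (fun a2 j => pvSetCell a2 lc j (row.getD j "")) a
            else a) acc) acc).getD p []
        = if p ∈ ks then pvRowFinal od (sl.getD p "") (acc.getD p []) else acc.getD p [] := by
  intro ks
  induction ks with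
  | nil => intro _ acc; simp
  | cons lc ks ih =>
      intro hnd acc
      rw [List.foldl_cons, ih hnd.of_cons]
      by_cases hpq : p = lc
      · subst hpq
        have hnotin : p ∉ ks := (List.nodup_cons.mp hnd).1
        rw [if_neg hnotin, if_pos (List.mem_cons_self), innerA_getD_eq]
      · rw [innerA_getD_ne od sl hpq]
        by_cases hmem : p ∈ ks
        · rw [if_pos hmem, if_pos (List.mem_cons_of_mem _ hmem)]
        · rw [if_neg hmem, if_neg (by simp [hpq, hmem])]

-- B's single pass over origin rows, per target row p (an empty row is skipped by B,
-- and on the A side its pvRowWrite is the empty fold, i.e. also a no-op)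
theorem foldl_outerB (sl : List String) (p : Nat) (hp : p < sl.length) :
    ∀ (od : List (List String)) (g : List (List String)),
      (od.foldl (fun g row =>
          if row.isEmpty then g
          else
            ((pvBuildPos sl).getD (row.headD "") []).foldl
              (fun a q =>
                (PySem.List.enumerate row 0).foldl
                  (fun a2 jv => pvSetCell a2 q.toNat jv.1.toNat jv.2) a) g) g).getD p []
        = pvRowFinal od (sl.getD p "") (g.getD p []) := by
  intro od
  induction od with
  | nil => intro g; rfl
  | cons row od ih =>
      intro g
      rw [List.foldl_cons, ih]
      simp only [pvRowFinal]
      rw [List.foldl_cons]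
      have hstep : (if row.isEmpty then g
            else
              ((pvBuildPos sl).getD (row.headD "") []).foldl
                (fun a q =>
                  (PySem.List.enumerate row 0).foldl
                    (fun a2 jv => pvSetCell a2 q.toNat jv.1.toNat jv.2) a) g).getD p []
          = if (sl.getD p "" == row.headD "") = true then pvRowWrite (g.getD p []) row
            else g.getD p [] := by
        by_cases hemp : row.isEmpty = true
        · have hrow : row = [] := List.isEmpty_iff.mp hemp
          subst hrow
          rw [if_pos hemp]
          by_cases hc : (sl.getD p "" == ([] : List String).headD "") = true
          · rw [if_pos hc]; simp [pvRowWrite]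
          · rw [if_neg hc]
        · rw [if_neg hemp]
          have e1 := List.foldl_map (f := Int.toNat)
              (g := fun a (q : Nat) => (PySem.List.enumerate row 0).foldl
                (fun a2 jv => pvSetCell a2 q jv.1.toNat jv.2) a)
              (l := (pvBuildPos sl).getD (row.headD "") []) (init := g)
          refine Eq.trans (congrArg (fun t => t.getD p []) e1.symm) ?_
          rw [buildPos_getD_toNat]
          rw [foldl_copy_nodup row p _ (List.nodup_range.filter _) g]
          by_cases hc : (sl.getD p "" == row.headD "") = true
          · rw [if_pos (List.mem_filter.mpr ⟨List.mem_range.mpr hp, hc⟩), if_pos hc]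
          · have hnm : p ∉ List.filter (fun k => sl.getD k "" == row.headD "")
                (List.range sl.length) := fun hmem => hc (List.mem_filter.mp hmem).2
            rw [if_neg hnm, if_neg hc]
      rw [hstep]

-- ===== VERDICT (by name: the statement is the Claim_ definition above) =====
theorem get_subset_data_spec : Claim_equal_get_subset_data := by
  intro od sl _ _
  unfold Spec_get_subset_data
  show get_subset_data od sl = get_subset_data_alt od sl
  unfold get_subset_data get_subset_data_alt
  set dc := (od.headD []).length with hdc
  set subset0 := sl.map (fun _ => List.replicate dc "") with hsub
  have hcopylen : ∀ (row : List String) (q : Nat) (a : List (List String)),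
      ((PySem.List.enumerate row 0).foldl
        (fun a2 jv => pvSetCell a2 q jv.1.toNat jv.2) a).length = a.length := by
    intro row q a
    exact foldl_length_inv _ (fun a (jv : Int × String) => length_pvSetCell a q jv.1.toNat jv.2) _ a
  have hfA : ∀ (acc : List (List String)) (lc : Nat),
      (od.foldl (fun a row =>
          if sl.getD lc "" == row.headD "" then
            (List.range row.length).foldl (fun a2 j => pvSetCell a2 lc j (row.getD j "")) a
          else a) acc).length = acc.length := by
    intro acc lc
    refine foldl_length_inv _ ?_ od acc
    intro a row
    by_cases hc : (sl.getD lc "" == row.headD "") = true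
    · rw [if_pos hc]
      exact foldl_length_inv _ (fun a j => length_pvSetCell a lc j (row.getD j "")) _ a
    · rw [if_neg hc]
  have hlenA : ((List.range sl.length).foldl
      (fun acc lc =>
        od.foldl (fun a row =>
          if sl.getD lc "" == row.headD "" then
            (List.range row.length).foldl (fun a2 j => pvSetCell a2 lc j (row.getD j "")) a
          else a) acc) subset0).length = sl.length :=
    (foldl_length_inv _ hfA (List.range sl.length) subset0).trans (by simp [hsub])
  have hfB : ∀ (g : List (List String)) (row : List String),
      ((if row.isEmpty then g
        else
          ((pvBuildPos sl).getD (row.headD "") []).foldl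
            (fun a q =>
              (PySem.List.enumerate row 0).foldl
                (fun a2 jv => pvSetCell a2 q.toNat jv.1.toNat jv.2) a) g)).length = g.length := by
    intro g row
    by_cases hemp : row.isEmpty = true
    · rw [if_pos hemp]
    · rw [if_neg hemp]
      refine foldl_length_inv _ ?_ _ g
      intro a q
      exact hcopylen row q.toNat a
  have hlenB : (od.foldl (fun g row =>
      if row.isEmpty then g
      else
        ((pvBuildPos sl).getD (row.headD "") []).foldl
          (fun a q =>
            (PySem.List.enumerate row 0).foldl
              (fun a2 jv => pvSetCell a2 q.toNat jv.1.toNat jv.2) a) g) subset0).length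
      = sl.length :=
    (foldl_length_inv _ hfB od subset0).trans (by simp [hsub])
  apply List.ext_getElem (by rw [hlenA, hlenB])
  intro i h1 h2
  have hi : i < sl.length := by rw [hlenA] at h1; exact h1
  have hinit : subset0.getD i [] = List.replicate dc "" := by
    rw [hsub, List.getD_eq_getElem _ [] (by simpa using hi), List.getElem_map]
  rw [← List.getD_eq_getElem _ [] h1, ← List.getD_eq_getElem _ [] h2]
  rw [foldl_innerA_nodup od sl i _ List.nodup_range subset0,
      if_pos (List.mem_range.mpr hi),
      foldl_outerB sl i hi od subset0, hinit]
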